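-- pv_equiv track=rewrite | github.com/out-somniac/asd | practice/by_topic/graphs/continuously_connected.py | order_edges
-- ===== SOURCE A (Python) =====
-- def order_edges(graph):
--     n = len(graph)
--     visited = [False for _ in range(n)]
--     path = []
--
--     def dfs_visit(graph, visited, path, u):
--         visited[u] = True
--
--         for v in range(u, len(graph)):
--             if graph[u][v]:
--                 if not visited[v]:
--                     visited[v]= True
--                     dfs_visit(graph, visited, path, v)
--                 path.append((u, v))
--
--     for u in range(n):
--         if not visited[u]:
--             dfs_visit(graph, visited, path, u)
--
--     return path
-- ===== SOURCE B (Python) =====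
-- def order_edges(graph):
--     n = len(graph)
--     visited = [False] * n
--     path = []
--     for r in range(n):
--         if visited[r]:
--             continue
--         visited[r] = True
--         stack = [(r, r, None)]  # frames: (node, next column, edge to append on resume)
--         while stack:
--             u, v, pend = stack.pop()
--             if pend is not None:
--                 path.append(pend)
--             while v < n:
--                 if graph[u][v]:
--                     if not visited[v]:
--                         visited[v] = True
--                         stack.append((u, v + 1, (u, v)))  # resume here; (u,v) appended after child finishes
--                         stack.append((v, v, None))
--                         break
--                     path.append((u, v))
--                 v += 1
--     return path
-- ===== Notes on version B (the rewrite author's own statement) =====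
-- stated objective: alternative
-- what changed: The recursive dfs_visit is replaced by an explicit-stack iterative DFS whose frames carry (node, next column, deferred edge), reproducing the append-after-child-returns order without recursion.
import Mathlib
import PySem

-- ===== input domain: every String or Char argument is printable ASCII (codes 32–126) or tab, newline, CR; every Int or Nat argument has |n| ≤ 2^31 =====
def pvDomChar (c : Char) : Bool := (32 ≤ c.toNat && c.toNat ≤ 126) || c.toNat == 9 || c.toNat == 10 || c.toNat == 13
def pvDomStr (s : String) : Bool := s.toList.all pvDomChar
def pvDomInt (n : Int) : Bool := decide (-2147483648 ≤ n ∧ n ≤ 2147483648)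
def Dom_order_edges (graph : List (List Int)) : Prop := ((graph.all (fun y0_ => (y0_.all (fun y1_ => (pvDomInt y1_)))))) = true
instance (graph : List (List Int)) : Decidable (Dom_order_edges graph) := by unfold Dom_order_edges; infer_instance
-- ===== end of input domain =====

-- B replaces A's recursive DFS by an explicit-stack iterative DFS (frames carry a node, its
-- next column, and a deferred edge appended when the frame resumes); same return value.

-- ===== PORT A =====
-- A's inner `dfs_visit` loop `for v in range(v0, n)`: appends (u,v) for truthy visited edges,
-- recurses first (marking v) for truthy unvisited ones.  The fuel argument only makes the
-- recursion structurally total; each fuel decrement coincides with marking a previously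
-- unvisited node, so the initial fuel `graph.length` is never exhausted.
def loopA (graph : List (List Int)) : Nat → List Bool → List (Int × Int) → Nat → Nat → List Bool × List (Int × Int)
  | fuel, visited, path, u, v =>
    if h : v < graph.length then
      if (graph.getD u []).getD v 0 ≠ 0 then
        if visited.getD v false then
          loopA graph fuel visited (path ++ [((u : Int), (v : Int))]) u (v + 1)
        else
          match fuel with
          | 0 => (visited, path)
          | fuel + 1 =>
            let r := loopA graph fuel (visited.set v true) path v v
            loopA graph fuel r.1 (r.2 ++ [((u : Int), (v : Int))]) u (v + 1)
      else
        loopA graph fuel visited path u (v + 1)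
    else (visited, path)
termination_by fuel visited path u v => (fuel, graph.length - v)
decreasing_by all_goals simp_wf <;> omega

def order_edges (graph : List (List Int)) : List (Int × Int) :=
  ((List.range graph.length).foldl
    (fun st u => if st.1.getD u false then st
                 else loopA graph graph.length (st.1.set u true) st.2 u u)
    (List.replicate graph.length false, [])).2

-- ===== PORT B =====
-- B's inner `while v < n` scan of one frame: appends visited truthy edges until either the
-- row is exhausted (inl: final path) or an unvisited child w is found (inr: it is marked and
-- returned so the machine can push the child frame and the deferred resume frame).
def scanB (graph : List (List Int)) : List Bool → List (Int × Int) → Nat → Nat →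
    Sum (List (Int × Int)) (List Bool × List (Int × Int) × Nat)
  | visited, path, u, v =>
    if h : v < graph.length then
      if (graph.getD u []).getD v 0 ≠ 0 then
        if visited.getD v false then
          scanB graph visited (path ++ [((u : Int), (v : Int))]) u (v + 1)
        else Sum.inr (visited.set v true, path, v)
      else scanB graph visited path u (v + 1)
    else Sum.inl path
termination_by visited path u v => graph.length - v
decreasing_by all_goals simp_wf <;> omega

-- B's `while stack` loop (Python pops from the end; here the top of the stack is the head).
-- Fuel only makes it total: every step shrinks 2*(unvisited count)+(stack length).
def machineB (graph : List (List Int)) : Nat → List Bool → List (Int × Int) →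
    List (Nat × Nat × Option (Int × Int)) → List Bool × List (Int × Int)
  | _, visited, path, [] => (visited, path)
  | 0, visited, path, _ => (visited, path)
  | fuel + 1, visited, path, (u, v, pend) :: rest =>
    let path1 := match pend with | some e => path ++ [e] | none => path
    match scanB graph visited path1 u v with
    | Sum.inl path2 => machineB graph fuel visited path2 rest
    | Sum.inr (vis2, path2, w) =>
        machineB graph fuel vis2 path2 ((w, w, none) :: (u, w + 1, some ((u : Int), (w : Int))) :: rest)

def order_edges_alt (graph : List (List Int)) : List (Int × Int) :=
  ((List.range graph.length).foldl
    (fun st r => if st.1.getD r false then st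
                 else machineB graph (2 * graph.length + 1) (st.1.set r true) st.2 [(r, r, none)])
    (List.replicate graph.length false, [])).2

-- ===== PRECONDITION & SPEC =====
-- Pre_ excludes exactly the inputs where Python A raises IndexError: some row shorter than
-- the number of rows (every row u is indexed at column n-1).
def Pre_order_edges (graph : List (List Int)) : Prop :=
  ∀ row ∈ graph, graph.length ≤ row.length
instance (graph : List (List Int)) : Decidable (Pre_order_edges graph) := by
  unfold Pre_order_edges; infer_instance

def pvWitness_order_edges : List (List Int) := [[1, 1], [0, 1]]

def Spec_order_edges (graph : List (List Int)) (out : List (Int × Int)) : Prop := out = order_edges_alt graph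
instance (graph : List (List Int)) (out : List (Int × Int)) : Decidable (Spec_order_edges graph out) := by unfold Spec_order_edges; infer_instance

-- ===== CLAIM (what is proved, stated in full; the proofs are below) =====
def Claim_equal_order_edges : Prop := ∀ (graph : List (List Int)), Dom_order_edges graph → Pre_order_edges graph → Spec_order_edges graph (order_edges graph)

-- ===== LEMMAS AND PROOFS =====

lemma count_false_set_true : ∀ (l : List Bool) (v : Nat), v < l.length → l.getD v false = false →
    (l.set v true).count false + 1 = l.count false := by
  intro l
  induction l with
  | nil => intro v h; simp at h
  | cons b t ih =>
    intro v hv hg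
    cases v with
    | zero => simp_all
    | succ v =>
      simp only [List.set_cons_succ, List.count_cons]
      have := ih v (by simpa using hv) (by simpa using hg)
      omega

lemma count_false_set_true_le (l : List Bool) (v : Nat) :
    (l.set v true).count false ≤ l.count false := by
  induction l generalizing v with
  | nil => simp
  | cons b t ih =>
    cases v with
    | zero => cases b <;> simp [List.count_cons]
    | succ v => simp only [List.set_cons_succ, List.count_cons]; have := ih v; omega

lemma one_le_count_false (l : List Bool) (v : Nat) (hv : v < l.length)
    (hg : l.getD v false = false) : 1 ≤ l.count false := by
  have := count_false_set_true l v hv hg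
  omega

lemma loopA_length (graph : List (List Int)) :
    ∀ fuel vis path u v, (loopA graph fuel vis path u v).1.length = vis.length := by
  intro fuel vis path u v
  fun_induction loopA graph fuel vis path u v <;> simp_all
  case case3 visited path u v hlt fuel r ht hv ih2 ih1 => exact ih2

lemma loopA_count (graph : List (List Int)) :
    ∀ fuel vis path u v, (loopA graph fuel vis path u v).1.count false ≤ vis.count false := by
  intro fuel vis path u v
  fun_induction loopA graph fuel vis path u v <;> simp_all
  case case3 visited path u v hlt fuel r ht hv ih2 ih1 =>
    have h1 := count_false_set_true_le visited v
    have h2 : r.1 = (loopA graph fuel (visited.set v true) path v v).1 := rfl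
    rw [h2] at ih1 ⊢
    omega


lemma loopA_fuel_congr (graph : List (List Int)) :
    ∀ fuel vis path u v, ∀ fuel' : Nat, vis.length = graph.length →
      vis.count false ≤ fuel → vis.count false ≤ fuel' →
      loopA graph fuel vis path u v = loopA graph fuel' vis path u v := by
  intro fuel vis path u v
  fun_induction loopA graph fuel vis path u v
  case case1 fuel visited path u v hlt ht hv ih =>
    intro fuel' hlen hf hf'
    conv_rhs => rw [loopA.eq_def]
    simp only [dif_pos hlt, if_pos ht, if_pos hv]
    exact ih fuel' hlen hf hf'
  case case2 visited path u v hlt ht hv =>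
    intro fuel' hlen hf hf'
    have := one_le_count_false visited v (by omega) (by simpa using hv)
    omega
  case case3 visited path u v hlt ht hv fuel r ih2 ih1 =>
    intro fuel' hlen hf hf'
    have hv' : v < visited.length := by omega
    have hc := count_false_set_true visited v hv' (by simpa using hv)
    cases fuel' with
    | zero => omega
    | succ f1 =>
      conv_rhs => rw [loopA.eq_def]
      simp only [dif_pos hlt, if_pos ht, if_neg hv]
      have hlen2 : (visited.set v true).length = graph.length := by
        rw [List.length_set]; exact hlen
      have hcc : (visited.set v true).count false ≤ fuel := by omega
      have hchild := ih2 f1 hlen2 hcc (by omega)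
      have hr1 : r = loopA graph fuel (visited.set v true) path v v := rfl
      have hrlen : r.1.length = graph.length := by
        rw [hr1, loopA_length, List.length_set]; exact hlen
      have hrcnt : r.1.count false ≤ (visited.set v true).count false := by
        rw [hr1]; exact loopA_count graph fuel (visited.set v true) path v v
      show loopA graph fuel r.1 (r.2 ++ [((u : Int), (v : Int))]) u (v + 1) = _
      rw [← hchild, ← hr1]
      exact ih1 f1 hrlen (by omega) (by omega)
  case case4 fuel visited path u v hlt ht ih =>
    intro fuel' hlen hf hf'
    conv_rhs => rw [loopA.eq_def]
    simp only [dif_pos hlt, if_neg ht]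
    exact ih fuel' hlen hf hf'
  case case5 fuel visited path u v hlt =>
    intro fuel' hlen hf hf'
    conv_rhs => rw [loopA.eq_def]
    simp only [dif_neg hlt]

lemma scan_inl (graph : List (List Int)) :
    ∀ vis path u v path', scanB graph vis path u v = Sum.inl path' →
      ∀ fuel, loopA graph fuel vis path u v = (vis, path') := by
  intro vis path u v
  fun_induction scanB graph vis path u v
  case case1 visited path u v hlt ht hv ih =>
    intro path' hs fuel
    rw [loopA.eq_def]
    simp only [dif_pos hlt, if_pos ht, if_pos hv]
    exact ih path' hs fuel
  case case2 visited path u v hlt ht hv =>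
    intro path' hs fuel
    simp at hs
  case case3 visited path u v hlt ht ih =>
    intro path' hs fuel
    rw [loopA.eq_def]
    simp only [dif_pos hlt, if_neg ht]
    exact ih path' hs fuel
  case case4 visited path u v hlt =>
    intro path' hs fuel
    rw [loopA.eq_def]
    simp only [dif_neg hlt]
    simp at hs
    rw [hs]

lemma scan_inr (graph : List (List Int)) :
    ∀ vis path u v vis2 path2 w, scanB graph vis path u v = Sum.inr (vis2, path2, w) →
      vis2 = vis.set w true ∧ w < graph.length ∧ vis.getD w false ≠ true ∧
      ∀ fuel, loopA graph (fuel + 1) vis path u v =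
        (let r := loopA graph fuel (vis.set w true) path2 w w
         loopA graph fuel r.1 (r.2 ++ [((u : Int), (w : Int))]) u (w + 1)) := by
  intro vis path u v
  fun_induction scanB graph vis path u v
  case case1 visited path u v hlt ht hv ih =>
    intro vis2 path2 w hs
    obtain ⟨h1, h2, h3, h4⟩ := ih vis2 path2 w hs
    refine ⟨h1, h2, h3, ?_⟩
    intro fuel
    rw [loopA.eq_def]
    simp only [dif_pos hlt, if_pos ht, if_pos hv]
    exact h4 fuel
  case case2 visited path u v hlt ht hv =>
    intro vis2 path2 w hs
    simp only [Sum.inr.injEq, Prod.mk.injEq] at hs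
    obtain ⟨h1, h2, h3⟩ := hs
    subst h3
    refine ⟨h1.symm, hlt, by simpa using hv, ?_⟩
    intro fuel
    rw [loopA.eq_def]
    simp only [dif_pos hlt, if_pos ht, if_neg hv]
    rw [h2]
  case case3 visited path u v hlt ht ih =>
    intro vis2 path2 w hs
    obtain ⟨h1, h2, h3, h4⟩ := ih vis2 path2 w hs
    refine ⟨h1, h2, h3, ?_⟩
    intro fuel
    rw [loopA.eq_def]
    simp only [dif_pos hlt, if_neg ht]
    exact h4 fuel
  case case4 visited path u v hlt =>
    intro vis2 path2 w hs
    simp at hs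

def foldFrames (graph : List (List Int)) : List Bool → List (Int × Int) →
    List (Nat × Nat × Option (Int × Int)) → List Bool × List (Int × Int)
  | vis, path, [] => (vis, path)
  | vis, path, (u, v, pend) :: rest =>
    let path1 := match pend with | some e => path ++ [e] | none => path
    let r := loopA graph (vis.count false) vis path1 u v
    foldFrames graph r.1 r.2 rest

lemma machine_step_aux (graph : List (List Int)) (fuel : Nat)
    (ih : ∀ vis path stack, vis.length = graph.length →
      2 * vis.count false + stack.length ≤ fuel →
      machineB graph fuel vis path stack = foldFrames graph vis path stack)
    (vis : List Bool) (path1 : List (Int × Int)) (u v : Nat)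
    (rest : List (Nat × Nat × Option (Int × Int)))
    (hlen : vis.length = graph.length)
    (hb : 2 * vis.count false + rest.length + 1 ≤ fuel + 1) :
    (match scanB graph vis path1 u v with
     | Sum.inl path2 => machineB graph fuel vis path2 rest
     | Sum.inr (vis2, path2, w) =>
         machineB graph fuel vis2 path2 ((w, w, none) :: (u, w + 1, some ((u : Int), (w : Int))) :: rest)) =
    foldFrames graph (loopA graph (vis.count false) vis path1 u v).1
      (loopA graph (vis.count false) vis path1 u v).2 rest := by
  split
  case _ path2 hscan =>
    rw [ih vis path2 rest hlen (by omega)]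
    rw [scan_inl graph vis path1 u v path2 hscan (vis.count false)]
  case _ vis2 path2 w hscan =>
    obtain ⟨h1, h2, h3, h4⟩ := scan_inr graph vis path1 u v vis2 path2 w hscan
    have hwlen : w < vis.length := by omega
    have hc := count_false_set_true vis w hwlen (by simpa using h3)
    have hlen2 : vis2.length = graph.length := by rw [h1, List.length_set]; exact hlen
    have hcv : vis.count false = vis2.count false + 1 := by rw [h1]; omega
    have hbound : 2 * vis2.count false + ((w, w, (none : Option (Int × Int))) ::
        (u, w + 1, some ((u : Int), (w : Int))) :: rest).length ≤ fuel := by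
      simp only [List.length_cons]; omega
    rw [ih vis2 path2 _ hlen2 hbound, hcv, h4 (vis2.count false)]
    simp only [foldFrames]
    have hr1 : loopA graph (vis2.count false) (vis.set w true) path2 w w =
        loopA graph (vis2.count false) vis2 path2 w w := by rw [h1]
    rw [hr1]
    set r1 := loopA graph (vis2.count false) vis2 path2 w w with hr
    have hrlen : r1.1.length = graph.length := by rw [hr, loopA_length]; exact hlen2
    have hrcnt : r1.1.count false ≤ vis2.count false := by rw [hr]; exact loopA_count _ _ _ _ _ _
    rw [loopA_fuel_congr graph (vis2.count false) r1.1 (r1.2 ++ [((u : Int), (w : Int))]) u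
      (w + 1) (r1.1.count false) hrlen hrcnt le_rfl]

lemma machine_eq_fold (graph : List (List Int)) :
    ∀ fuel vis path stack, vis.length = graph.length →
      2 * vis.count false + stack.length ≤ fuel →
      machineB graph fuel vis path stack = foldFrames graph vis path stack := by
  intro fuel
  induction fuel with
  | zero =>
    intro vis path stack hlen hb
    have : stack = [] := by cases stack <;> simp_all
    subst this
    cases vis <;> rfl
  | succ fuel ih =>
    intro vis path stack hlen hb
    match stack with
    | [] => rfl
    | (u, v, pend) :: rest =>
      have hb' : 2 * vis.count false + rest.length + 1 ≤ fuel + 1 := by simp at hb; omega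
      cases pend with
      | none =>
        simp only [machineB, foldFrames]
        exact machine_step_aux graph fuel ih vis path u v rest hlen hb'
      | some e =>
        simp only [machineB, foldFrames]
        exact machine_step_aux graph fuel ih vis (path ++ [e]) u v rest hlen hb'

lemma foldl_congr_inv {α β : Type} (P : α → Prop) (f g : α → β → α)
    (hfg : ∀ a b, P a → f a b = g a b) (hp : ∀ a b, P a → P (f a b)) :
    ∀ (l : List β) (a : α), P a → l.foldl f a = l.foldl g a := by
  intro l
  induction l with
  | nil => intro a _; rfl
  | cons b t ih =>
    intro a ha
    simp only [List.foldl_cons]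
    rw [← hfg a b ha, ih _ (hp a b ha)]

-- ===== VERDICT (by name: the statement is the Claim_ definition above) =====
theorem order_edges_spec : Claim_equal_order_edges := by
  intro graph _ _
  show order_edges graph = order_edges_alt graph
  unfold order_edges order_edges_alt
  have h := foldl_congr_inv (fun st => st.1.length = graph.length)
    (fun st u => if st.1.getD u false then st else loopA graph graph.length (st.1.set u true) st.2 u u)
    (fun st r => if st.1.getD r false then st
                 else machineB graph (2 * graph.length + 1) (st.1.set r true) st.2 [(r, r, none)])
    (by
      intro st u hP
      simp only []
      split_ifs with hcond
      · rfl
      · have hlen' : (st.1.set u true).length = graph.length := by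
          rw [List.length_set]; exact hP
        have hcnt : (st.1.set u true).count false ≤ graph.length := by
          rw [← hlen']; exact List.count_le_length
        rw [machine_eq_fold graph _ _ _ _ hlen' (by simp only [List.length_cons, List.length_nil]; omega)]
        simp only [foldFrames]
        rw [loopA_fuel_congr graph graph.length (st.1.set u true) st.2 u u
          ((st.1.set u true).count false) hlen' hcnt le_rfl])
    (by
      intro st u hP
      simp only []
      split_ifs with hcond
      · exact hP
      · rw [loopA_length, List.length_set]; exact hP)
    (List.range graph.length) (List.replicate graph.length false, []) (by simp)
  rw [h]
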